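-- pv_equiv track=rewrite | github.com/Valdemal/CG4 | graphics/help_functions.py | cyclic_iter
-- ===== SOURCE A (Python) =====
-- from typing import List, Iterable
--
-- def cyclic_iter(container: Iterable):
--     it = iter(container)
--     try:
--         current = first = next(it)
--
--         while True:
--             try:
--                 yield current
--                 current = next(it)
--             except StopIteration:
--                 yield first
--                 break
--
--     except StopIteration:
--         raise IndexError("Длина контейнера должна быть не менее 1!")
-- ===== SOURCE B (Python) =====
-- def cyclic_iter(container):
--     # Eager: materialize the container and return the concatenation items + items[:1]
--     # as a list. No generator, no StopIteration handling.
--     items = list(container)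
--     if not items:
--         raise IndexError("Длина контейнера должна быть не менее 1!")
--     return items + items[:1]
-- ===== Notes on version B (the rewrite author's own statement) =====
-- stated objective: simpler
-- what changed: B is not a generator at all: it materializes the container into a list once and returns the list items + items[:1], replacing A's lazy while-True/StopIteration streaming with eager list concatenation (note: B is eager where A streams lazily; the yielded sequence is identical).
import Mathlib
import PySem

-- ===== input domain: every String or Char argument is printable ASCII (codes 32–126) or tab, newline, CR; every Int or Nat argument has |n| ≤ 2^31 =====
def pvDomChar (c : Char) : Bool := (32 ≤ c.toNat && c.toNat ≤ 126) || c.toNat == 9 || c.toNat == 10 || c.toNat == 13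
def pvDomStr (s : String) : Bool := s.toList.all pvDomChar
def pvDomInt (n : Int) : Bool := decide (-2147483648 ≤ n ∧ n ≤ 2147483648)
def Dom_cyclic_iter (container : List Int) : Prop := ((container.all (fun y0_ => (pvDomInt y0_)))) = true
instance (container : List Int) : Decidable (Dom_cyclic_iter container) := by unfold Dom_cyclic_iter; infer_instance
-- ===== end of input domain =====

-- B replaces A's lazy generator (while-True loop catching StopIteration) with eager
-- list materialization and the concatenation items + items[:1]; B is eager where A is
-- lazy, the yielded sequence of values is identical.

-- ===== PORT A =====
-- A's while-True loop: yields `current`, then advances the iterator; on exhaustion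
-- yields `first` and stops.
def cyclicLoopA (first : Int) (current : Int) (rest : List Int) : List Int :=
  match rest with
  | [] => [current, first]
  | x :: xs => current :: cyclicLoopA first x xs

def cyclic_iter (container : List Int) : List Int :=
  match container with
  | [] => []            -- Python raises IndexError here; excluded by Pre_
  | h :: t => cyclicLoopA h h t

-- ===== PORT B =====
def cyclic_iter_alt (container : List Int) : List Int :=
  let items := container
  if items = [] then []             -- Python raises IndexError here; excluded by Pre_
  else items ++ PySem.List.slice items none (some 1)   -- items + items[:1]

-- ===== PRECONDITION & SPEC =====
-- Pre_ excludes the empty container, on which both Pythons raise IndexError.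
def Pre_cyclic_iter (container : List Int) : Prop := container ≠ []
instance (container : List Int) : Decidable (Pre_cyclic_iter container) := by unfold Pre_cyclic_iter; infer_instance
def pvWitness_cyclic_iter : List Int := [3, 1, 2]

def Spec_cyclic_iter (container : List Int) (out : List Int) : Prop := out = cyclic_iter_alt container
instance (container : List Int) (out : List Int) : Decidable (Spec_cyclic_iter container out) := by unfold Spec_cyclic_iter; infer_instance

-- ===== CLAIM =====
def Claim_equal_cyclic_iter : Prop := ∀ (container : List Int), Dom_cyclic_iter container → Pre_cyclic_iter container → Spec_cyclic_iter container (cyclic_iter container)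

-- ===== LEMMAS AND PROOFS =====
theorem cyclicLoopA_eq (first : Int) (current : Int) (rest : List Int) :
    cyclicLoopA first current rest = current :: (rest ++ [first]) := by
  induction rest generalizing current with
  | nil => rfl
  | cons x xs ih => simp [cyclicLoopA, ih]

-- ===== VERDICT =====
theorem cyclic_iter_spec : Claim_equal_cyclic_iter := by
  intro container _ hpre
  unfold Spec_cyclic_iter
  cases container with
  | nil => exact absurd rfl hpre
  | cons h t =>
    simp [cyclic_iter, cyclic_iter_alt, cyclicLoopA_eq, PySem.List.slice]
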